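-- pv_equiv track=rewrite | github.com/eddiethedean/ryact | scripts/apply_parity_burndown_inventory.py | _patch_wave_burndown_v12_dom_manifest_slices
-- ===== SOURCE A (Python) =====
-- def _patch_wave_burndown_v12_dom_manifest_slices(cases: list[dict]) -> int:
--     changed = 0
--     targets: tuple[tuple[str, str, str], ...] = (
--         (
--             "react_dom.ReactDOMComponent-test.reactdomcomponent.custom_attributes."
--             "allows_assignment_of_custom_attributes_with_string_values.6c68b6ea",
--             "react_dom.incremental.customDataAttributeString",
--             "tests_upstream/react_dom/test_dom_custom_attributes_string_and_cased.py",
--         ),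
--         (
--             "react_dom.ReactDOMComponent-test.reactdomcomponent.custom_attributes."
--             "allows_cased_custom_attributes.5d9d870c",
--             "react_dom.server.casedCustomAttributeNames",
--             "tests_upstream/react_dom/test_dom_custom_attributes_string_and_cased.py",
--         ),
--     )
--     for row_id, manifest_id, py_test in targets:
--         for c in cases:
--             if c.get("id") != row_id or c.get("status") != "pending":
--                 continue
--             c["status"] = "implemented"
--             c["manifest_id"] = manifest_id
--             c["python_test"] = py_test
--             c["non_goal_rationale"] = None
--             changed += 1
--             break
--     return changed
-- ===== SOURCE B (Python) =====
-- # Single pass over `cases`, driven by a dict index of the targets; mutates matched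
-- # case dicts in place exactly as the original does (equivalence claimed on the
-- # return value; the in-place mutations are the same ones).
-- _TARGETS = (
--     (
--         "react_dom.ReactDOMComponent-test.reactdomcomponent.custom_attributes."
--         "allows_assignment_of_custom_attributes_with_string_values.6c68b6ea",
--         "react_dom.incremental.customDataAttributeString",
--         "tests_upstream/react_dom/test_dom_custom_attributes_string_and_cased.py",
--     ),
--     (
--         "react_dom.ReactDOMComponent-test.reactdomcomponent.custom_attributes."
--         "allows_cased_custom_attributes.5d9d870c",
--         "react_dom.server.casedCustomAttributeNames",
--         "tests_upstream/react_dom/test_dom_custom_attributes_string_and_cased.py",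
--     ),
-- )
--
--
-- def _patch_wave_burndown_v12_dom_manifest_slices(cases: list[dict]) -> int:
--     by_id = {row_id: (manifest_id, py_test) for row_id, manifest_id, py_test in _TARGETS}
--     changed = 0
--     for c in cases:
--         cid = c.get("id")
--         meta = by_id.get(cid)
--         if meta is None or c.get("status") != "pending":
--             continue
--         manifest_id, py_test = meta
--         c["status"] = "implemented"
--         c["manifest_id"] = manifest_id
--         c["python_test"] = py_test
--         c["non_goal_rationale"] = None
--         changed += 1
--         del by_id[cid]
--     return changed
-- ===== Notes on version B (the rewrite author's own statement) =====
-- stated objective: idiomatic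
-- what changed: Replaces the per-target scan over cases (outer loop over targets, inner scan with break) by a dict index by_id over the targets and a single pass over cases, deleting a target's key once matched so duplicates are ignored.
import Mathlib
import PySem

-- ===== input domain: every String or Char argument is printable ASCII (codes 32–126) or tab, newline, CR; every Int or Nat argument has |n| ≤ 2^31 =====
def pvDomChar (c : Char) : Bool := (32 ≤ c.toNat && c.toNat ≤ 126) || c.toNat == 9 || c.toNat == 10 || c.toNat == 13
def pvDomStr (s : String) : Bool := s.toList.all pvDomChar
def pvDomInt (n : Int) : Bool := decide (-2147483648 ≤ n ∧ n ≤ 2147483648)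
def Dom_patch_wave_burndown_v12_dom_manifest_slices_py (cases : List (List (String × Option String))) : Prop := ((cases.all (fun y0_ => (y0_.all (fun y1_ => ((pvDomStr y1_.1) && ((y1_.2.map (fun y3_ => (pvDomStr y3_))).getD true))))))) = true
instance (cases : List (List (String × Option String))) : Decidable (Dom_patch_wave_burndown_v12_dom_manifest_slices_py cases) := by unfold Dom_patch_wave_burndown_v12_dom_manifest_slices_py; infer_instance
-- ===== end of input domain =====

-- B replaces A's per-target scan of `cases` (outer loop over targets, inner scan with break)
-- by a dict index over the targets and one pass over `cases`, deleting a key once matched;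
-- both Pythons mutate the matched case dicts in place identically — equivalence here is about the return value.

-- Shared ports of the Python dict primitives on a case dict (c.get(k) / c[k] = v):
-- exact per the assoc-list convention (lookup = first match; assignment overwrites in place else appends).
def pyGetKey (c : List (String × Option String)) (k : String) : Option (Option String) :=
  PySem.Dict.get? (PySem.Dict.mk c) k

def pySetKey (c : List (String × Option String)) (k : String) (v : Option String) : List (String × Option String) :=
  (PySem.Dict.insert (PySem.Dict.mk c) k v).items

-- the target rows (string literals shared by both ports, as data)
def pvRow1 : String := "react_dom.ReactDOMComponent-test.reactdomcomponent.custom_attributes.allows_assignment_of_custom_attributes_with_string_values.6c68b6ea"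
def pvMan1 : String := "react_dom.incremental.customDataAttributeString"
def pvRow2 : String := "react_dom.ReactDOMComponent-test.reactdomcomponent.custom_attributes.allows_cased_custom_attributes.5d9d870c"
def pvMan2 : String := "react_dom.server.casedCustomAttributeNames"
def pvTest : String := "tests_upstream/react_dom/test_dom_custom_attributes_string_and_cased.py"

-- ===== PORT A =====
def pvTargets : List (String × String × String) := [(pvRow1, pvMan1, pvTest), (pvRow2, pvMan2, pvTest)]

-- the four in-place field assignments of A's matched branch
def applyFields (manifestId pyTest : String) (c : List (String × Option String)) : List (String × Option String) :=
  pySetKey (pySetKey (pySetKey (pySetKey c "status" (some "implemented")) "manifest_id" (some manifestId))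
      "python_test" (some pyTest)) "non_goal_rationale" none

-- A's inner `for c in cases` loop for one target: returns (updated cases, updated changed)
def aScan (rowId manifestId pyTest : String) :
    List (List (String × Option String)) → Int → (List (List (String × Option String)) × Int)
  | [], ch => ([], ch)
  | c :: rest, ch =>
    if pyGetKey c "id" ≠ some (some rowId) ∨ pyGetKey c "status" ≠ some (some "pending") then
      let r := aScan rowId manifestId pyTest rest ch
      (c :: r.1, r.2)
    else
      (applyFields manifestId pyTest c :: rest, ch + 1)    -- break

def patch_wave_burndown_v12_dom_manifest_slices_py (cases : List (List (String × Option String))) : Int :=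
  (pvTargets.foldl (fun st t => aScan t.1 t.2.1 t.2.2 st.1 st.2) (cases, (0 : Int))).2

-- ===== PORT B =====
-- B's single pass: by_id maps a still-pending target row id to its metadata; on a match the key is deleted.
-- (B's in-place mutations of the matched case dict are side effects the return value never reads.)
def bGo (byId : PySem.Dict String (String × String)) (changed : Int) :
    List (List (String × Option String)) → Int
  | [] => changed
  | c :: rest =>
    match pyGetKey c "id" with
    | some (some cid) =>
      match byId.get? cid with
      | some _ =>
        if pyGetKey c "status" = some (some "pending") then
          bGo (byId.erase cid) (changed + 1) rest
        else bGo byId changed rest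
      | none => bGo byId changed rest
    | _ => bGo byId changed rest    -- c.get("id") is None or missing: by_id.get returns None

def pvById0 : PySem.Dict String (String × String) :=
  PySem.Dict.ofList [(pvRow1, (pvMan1, pvTest)), (pvRow2, (pvMan2, pvTest))]

def patch_wave_burndown_v12_dom_manifest_slices_py_alt (cases : List (List (String × Option String))) : Int :=
  bGo pvById0 0 cases

-- ===== PRECONDITION & SPEC =====
def Spec_patch_wave_burndown_v12_dom_manifest_slices_py (cases : List (List (String × Option String))) (out : Int) : Prop := out = patch_wave_burndown_v12_dom_manifest_slices_py_alt cases
instance (cases : List (List (String × Option String))) (out : Int) : Decidable (Spec_patch_wave_burndown_v12_dom_manifest_slices_py cases out) := by unfold Spec_patch_wave_burndown_v12_dom_manifest_slices_py; infer_instance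

-- ===== CLAIM (what is proved, stated in full; the proofs are below) =====
def Claim_equal_patch_wave_burndown_v12_dom_manifest_slices_py : Prop := ∀ (cases : List (List (String × Option String))), Dom_patch_wave_burndown_v12_dom_manifest_slices_py cases → Spec_patch_wave_burndown_v12_dom_manifest_slices_py cases (patch_wave_burndown_v12_dom_manifest_slices_py cases)

-- ===== LEMMAS AND PROOFS =====

-- a case matches target row id t
def mtch (t : String) (c : List (String × Option String)) : Bool :=
  decide (pyGetKey c "id" = some (some t)) && decide (pyGetKey c "status" = some (some "pending"))

theorem pyGetKey_pySetKey_of_ne (c : List (String × Option String)) {k' k : String}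
    (v : Option String) (h : k' ≠ k) : pyGetKey (pySetKey c k v) k' = pyGetKey c k' := by
  unfold pyGetKey pySetKey
  exact PySem.Dict.get?_insert_of_ne _ v h

theorem pyGetKey_id_applyFields (m p : String) (c : List (String × Option String)) :
    pyGetKey (applyFields m p c) "id" = pyGetKey c "id" := by
  unfold applyFields
  rw [pyGetKey_pySetKey_of_ne _ _ (by decide), pyGetKey_pySetKey_of_ne _ _ (by decide),
      pyGetKey_pySetKey_of_ne _ _ (by decide), pyGetKey_pySetKey_of_ne _ _ (by decide)]

theorem aScan_snd (t m p : String) :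
    ∀ (cs : List (List (String × Option String))) (ch : Int),
      (aScan t m p cs ch).2 = ch + (if cs.any (mtch t) then 1 else 0) := by
  intro cs
  induction cs with
  | nil => intro ch; simp [aScan]
  | cons c rest ih =>
    intro ch
    by_cases h1 : pyGetKey c "id" = some (some t)
    · by_cases h2 : pyGetKey c "status" = some (some "pending")
      · simp [aScan, h1, h2, mtch]
      · simp [aScan, h1, h2, mtch, ih]
    · simp [aScan, h1, mtch, ih]

theorem aScan_any (t t' m p : String) (h : t ≠ t') :
    ∀ (cs : List (List (String × Option String))) (ch : Int),
      ((aScan t m p cs ch).1).any (mtch t') = cs.any (mtch t') := by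
  intro cs
  induction cs with
  | nil => intro ch; simp [aScan]
  | cons c rest ih =>
    intro ch
    by_cases h1 : pyGetKey c "id" = some (some t)
    · by_cases h2 : pyGetKey c "status" = some (some "pending")
      · have hm : mtch t' (applyFields m p c) = false := by
          simp [mtch, pyGetKey_id_applyFields, h1, h]
        have hm' : mtch t' c = false := by simp [mtch, h1, h]
        simp [aScan, h1, h2, hm, hm']
      · simp [aScan, h1, h2, ih]
    · simp [aScan, h1, ih]

theorem contains_of_get?_some {d : PySem.Dict String (String × String)} {k : String}
    {v : String × String} (h : d.get? k = some v) : d.contains k = true := by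
  rw [PySem.Dict.contains_eq_isSome_get?, h]; rfl

theorem contains_of_get?_none {d : PySem.Dict String (String × String)} {k : String}
    (h : d.get? k = none) : d.contains k = false := by
  rw [PySem.Dict.contains_eq_isSome_get?, h]; rfl

theorem contains_erase_self (d : PySem.Dict String (String × String)) (k : String) :
    (d.erase k).contains k = false := by
  obtain ⟨l⟩ := d
  show (l.filter fun p => !(p.1 == k)).any (fun p => p.1 == k) = false
  induction l with
  | nil => rfl
  | cons a l ih => by_cases ha : a.1 = k <;> simp [ha, ih]

theorem contains_erase_of_ne (d : PySem.Dict String (String × String)) {k k' : String}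
    (h : k' ≠ k) : (d.erase k).contains k' = d.contains k' := by
  obtain ⟨l⟩ := d
  show (l.filter fun p => !(p.1 == k)).any (fun p => p.1 == k') = l.any (fun p => p.1 == k')
  induction l with
  | nil => rfl
  | cons a l ih =>
    by_cases ha : a.1 = k
    · simp [ha, Ne.symm h, ih]
    · simp [ha, ih]

theorem bGo_eq (t1 t2 : String) (hne : t1 ≠ t2) :
    ∀ (cs : List (List (String × Option String))) (d : PySem.Dict String (String × String)) (ch : Int),
      (∀ k, d.contains k = true → k = t1 ∨ k = t2) →
      bGo d ch cs = ch + (if d.contains t1 && cs.any (mtch t1) then 1 else 0)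
                       + (if d.contains t2 && cs.any (mtch t2) then 1 else 0) := by
  intro cs
  induction cs with
  | nil => intro d ch hsub; simp [bGo]
  | cons c rest ih =>
    intro d ch hsub
    rcases hid : pyGetKey c "id" with _ | o
    · have m1 : mtch t1 c = false := by simp [mtch, hid]
      have m2 : mtch t2 c = false := by simp [mtch, hid]
      simp only [bGo, hid]
      rw [ih d ch hsub]
      simp [m1, m2]
    · rcases o with _ | cid
      · have m1 : mtch t1 c = false := by simp [mtch, hid]
        have m2 : mtch t2 c = false := by simp [mtch, hid]
        simp only [bGo, hid]
        rw [ih d ch hsub]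
        simp [m1, m2]
      · rcases hget : d.get? cid with _ | mv
        · have hcont : d.contains cid = false := contains_of_get?_none hget
          simp only [bGo, hid, hget]
          rw [ih d ch hsub]
          have key : ∀ t, (d.contains t && (c :: rest).any (mtch t)) = (d.contains t && rest.any (mtch t)) := by
            intro t
            by_cases hct : cid = t
            · subst hct; simp [hcont]
            · have : mtch t c = false := by simp [mtch, hid, hct]
              simp [this]
          rw [← key t1, ← key t2]
        · by_cases hp : pyGetKey c "status" = some (some "pending")
          · have hcont : d.contains cid = true := contains_of_get?_some hget
            simp only [bGo, hid, hget, if_pos hp]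
            have hsub' : ∀ k, (d.erase cid).contains k = true → k = t1 ∨ k = t2 := by
              intro k hk
              by_cases hkc : k = cid
              · exact hsub k (by rwa [hkc])
              · exact hsub k (by rwa [contains_erase_of_ne d hkc] at hk)
            rw [ih (d.erase cid) (ch + 1) hsub']
            rcases hsub cid hcont with h1 | h2
            · subst h1
              have e1 : (d.erase cid).contains cid = false := contains_erase_self d cid
              have e2 : (d.erase cid).contains t2 = d.contains t2 := contains_erase_of_ne d (Ne.symm hne)
              have m1 : mtch cid c = true := by simp [mtch, hid, hp]
              have m2 : mtch t2 c = false := by simp [mtch, hid, hne]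
              rw [e1, e2]
              simp only [List.any_cons, m1, m2, hcont, Bool.false_and, Bool.true_or, Bool.false_or,
                Bool.true_and, Bool.false_eq_true, if_false, if_true]
              split_ifs <;> omega
            · subst h2
              have e1 : (d.erase cid).contains cid = false := contains_erase_self d cid
              have e2 : (d.erase cid).contains t1 = d.contains t1 := contains_erase_of_ne d hne
              have m2 : mtch cid c = true := by simp [mtch, hid, hp]
              have m1 : mtch t1 c = false := by simp [mtch, hid, Ne.symm hne]
              rw [e1, e2]
              simp only [List.any_cons, m1, m2, hcont, Bool.false_and, Bool.true_or, Bool.false_or,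
                Bool.true_and, Bool.false_eq_true, if_false, if_true]
              split_ifs <;> omega
          · have m1 : mtch t1 c = false := by simp [mtch, hp]
            have m2 : mtch t2 c = false := by simp [mtch, hp]
            simp only [bGo, hid, hget, if_neg hp]
            rw [ih d ch hsub]
            simp [m1, m2]

-- ===== VERDICT (by name: the statement is the Claim_ definition above) =====
set_option maxRecDepth 16384 in
theorem patch_wave_burndown_v12_dom_manifest_slices_py_spec : Claim_equal_patch_wave_burndown_v12_dom_manifest_slices_py := by
  intro cases _
  unfold Spec_patch_wave_burndown_v12_dom_manifest_slices_py
  have hne : pvRow1 ≠ pvRow2 := by decide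
  have hd : pvById0 = PySem.Dict.mk [(pvRow1, (pvMan1, pvTest)), (pvRow2, (pvMan2, pvTest))] := by decide
  have hsub : ∀ k, pvById0.contains k = true → k = pvRow1 ∨ k = pvRow2 := by
    intro k hk
    rw [hd] at hk
    simp [PySem.Dict.contains] at hk
    rcases hk with h | h
    · exact Or.inl h.symm
    · exact Or.inr h.symm
  have hc1 : pvById0.contains pvRow1 = true := by rw [hd]; simp [PySem.Dict.contains]
  have hc2 : pvById0.contains pvRow2 = true := by rw [hd]; simp [PySem.Dict.contains]
  unfold patch_wave_burndown_v12_dom_manifest_slices_py patch_wave_burndown_v12_dom_manifest_slices_py_alt pvTargets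
  simp only [List.foldl]
  rw [bGo_eq pvRow1 pvRow2 hne cases pvById0 0 hsub, hc1, hc2]
  rw [aScan_snd, aScan_any pvRow1 pvRow2 pvMan1 pvTest hne, aScan_snd]
  simp
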